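-- pv_equiv track=rewrite | github.com/Almeida-a/microrato-challenges | agent/C2/ternary_tree.py | _valid_crossroad
-- ===== SOURCE A (Python) =====
-- from typing import Tuple, Set, List
--
-- WALL: int = 1
--
-- CLEAR: int = 2
--
-- ORIGIN: int = 3
--
-- def _dead_end(ways: List[int], valid_check: bool) -> bool:
--     assert (not valid_check) or _valid_crossroad(ways), "Invalid crossroad depiction"
--     if ORIGIN in ways:
--         ways.remove(ORIGIN)
--     # The remaining ways are walls
--     return all([way == WALL for way in ways])
--
-- def _valid_crossroad(ways: List[int]) -> bool:
--     """
--     Conditions: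
--         1 - One and only one ORIGIN
--         2 - Others are of type CLEAR or WALL
--         One of the following:
--             3 - More than one CLEAR (meaning there is only one path ahead, excluding the one the C4 came from)
--             4 - Dead end [see _dead_end], although not techically a crossroad, it is useful here to define as such
--     :param ways:
--     :return: All conditions are met => True, False otherwise
--     """
--     # Condition 1
--     if ORIGIN not in ways:
--         return False
--     ways.remove(ORIGIN)
--     if ORIGIN in ways:
--         return False
--
--     # Condition 2
--     c2: bool = all([way in (CLEAR, WALL) for way in ways])
--
--     # Condition 3
--     tmp: list = list(filter(lambda way: not (way == CLEAR), ways))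
--     c3: bool = len(tmp) <= 1
--
--     # Condition 4
--     c4: bool = _dead_end(ways, valid_check=False)
--
--     return c2 and (c3 or c4)
-- ===== SOURCE B (Python) =====
-- from typing import List
--
-- WALL: int = 1
-- CLEAR: int = 2
-- ORIGIN: int = 3
--
-- def _valid_crossroad(ways: List[int]) -> bool:
--     # Same mutation/early-exit behaviour as A, then ONE tallying pass.
--     if ORIGIN not in ways:
--         return False
--     ways.remove(ORIGIN)
--     if ORIGIN in ways:
--         return False
--     clear = wall = n = 0
--     for w in ways:
--         if w == CLEAR:
--             clear += 1
--         elif w == WALL: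
--             wall += 1
--         n += 1
--     c2 = clear + wall == n
--     c3 = n - clear <= 1
--     c4 = wall == n
--     return c2 and (c3 or c4)
-- ===== Notes on version B (the rewrite author's own statement) =====
-- stated objective: simpler
-- what changed: Replaces A's three separate scans (membership comprehension, filter for non-CLEAR, and the _dead_end all-walls scan) with a single tallying pass whose counters derive c2, c3, c4 arithmetically.
import Mathlib
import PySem

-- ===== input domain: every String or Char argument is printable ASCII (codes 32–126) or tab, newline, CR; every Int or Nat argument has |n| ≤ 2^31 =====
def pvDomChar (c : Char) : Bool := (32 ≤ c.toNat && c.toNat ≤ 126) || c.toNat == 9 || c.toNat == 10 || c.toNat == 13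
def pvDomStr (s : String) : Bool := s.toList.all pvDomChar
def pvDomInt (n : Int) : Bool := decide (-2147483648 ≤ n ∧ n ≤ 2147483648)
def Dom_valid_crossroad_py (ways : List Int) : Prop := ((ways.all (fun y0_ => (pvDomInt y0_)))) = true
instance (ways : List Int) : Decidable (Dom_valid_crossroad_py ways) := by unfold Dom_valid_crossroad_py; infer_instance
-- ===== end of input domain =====

-- B fuses A's three scans (membership-check comprehension, filter, _dead_end) into one
-- tallying pass; return-value equivalence is proved (both Pythons mutate `ways` identically).
-- ===== PORT A =====
def dead_end_py (ways : List Int) (_valid_check : Bool) : Bool :=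
  -- assert is vacuous here: only called with valid_check=False
  let ways := if ways.contains 3 then (PySem.List.remove? ways 3).getD ways else ways
  (ways.map (fun way => way == 1)).all id

def valid_crossroad_py (ways : List Int) : Bool :=
  if !(ways.contains 3) then false
  else
    let ways := (PySem.List.remove? ways 3).getD ways
    if ways.contains 3 then false
    else
      let c2 : Bool := (ways.map (fun way => way == 2 || way == 1)).all id
      let tmp : List Int := ways.filter (fun way => !(way == 2))
      let c3 : Bool := decide (tmp.length ≤ 1)
      let c4 : Bool := dead_end_py ways false
      c2 && (c3 || c4)

-- ===== PORT B =====
def valid_crossroad_py_alt (ways : List Int) : Bool :=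
  if !(ways.contains 3) then false
  else
    let ways := (PySem.List.remove? ways 3).getD ways
    if ways.contains 3 then false
    else
      let t : Int × Int × Int := ways.foldl
        (fun acc w =>
          ((if w == 2 then acc.1 + 1 else acc.1),
           (if w == 1 then acc.2.1 + 1 else acc.2.1),
           acc.2.2 + 1)) (0, 0, 0)
      let c2 : Bool := decide (t.1 + t.2.1 = t.2.2)
      let c3 : Bool := decide (t.2.2 - t.1 ≤ 1)
      let c4 : Bool := decide (t.2.1 = t.2.2)
      c2 && (c3 || c4)

-- ===== PRECONDITION & SPEC =====
def Spec_valid_crossroad_py (ways : List Int) (out : Bool) : Prop := out = valid_crossroad_py_alt ways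
instance (ways : List Int) (out : Bool) : Decidable (Spec_valid_crossroad_py ways out) := by unfold Spec_valid_crossroad_py; infer_instance

-- ===== CLAIM (what is proved, stated in full; the proofs are below) =====
def Claim_equal_valid_crossroad_py : Prop := ∀ (ways : List Int), Dom_valid_crossroad_py ways → Spec_valid_crossroad_py ways (valid_crossroad_py ways)

-- ===== LEMMAS AND PROOFS =====

-- #2s and #1s together never exceed the length
lemma countP_two_one_le (ys : List Int) :
    ys.countP (fun w => w == 2) + ys.countP (fun w => w == 1) ≤ ys.length := by
  induction ys with
  | nil => simp
  | cons x xs ih =>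
    simp only [List.countP_cons, List.length_cons]
    by_cases hx2 : x = 2 <;> by_cases hx1 : x = 1 <;> simp [hx2, hx1] <;> omega

-- counts of 2s and 1s fill the whole length iff every element is 2 or 1
lemma countP_two_one (ys : List Int) :
    ys.countP (fun w => w == 2) + ys.countP (fun w => w == 1) = ys.length ↔
      ∀ w ∈ ys, w = 2 ∨ w = 1 := by
  induction ys with
  | nil => simp
  | cons x xs ih =>
    have hle := countP_two_one_le xs
    simp only [List.countP_cons, List.length_cons, List.mem_cons, forall_eq_or_imp, ← ih]
    by_cases hx2 : x = 2 <;> by_cases hx1 : x = 1 <;> simp [hx2, hx1] <;> omega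

-- the tallying fold computes (#2s, #1s, length), shifted by the accumulator
lemma fold_tally (ys : List Int) (a b c : Int) :
    ys.foldl (fun acc w =>
        ((if w == 2 then acc.1 + 1 else acc.1),
         (if w == 1 then acc.2.1 + 1 else acc.2.1),
         acc.2.2 + 1)) (a, b, c)
    = (a + (ys.countP (fun w => w == 2) : Int),
       b + (ys.countP (fun w => w == 1) : Int),
       c + (ys.length : Int)) := by
  induction ys generalizing a b c with
  | nil => simp
  | cons x xs ih =>
    simp only [List.foldl_cons, List.countP_cons, List.length_cons, ih]
    by_cases hx2 : x = 2 <;> by_cases hx1 : x = 1 <;>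
      simp [hx2, hx1, Prod.ext_iff] <;> omega

-- the two bodies agree on any already-mutated (3-free) list
lemma body_eq (ys : List Int) (h3 : ys.contains 3 = false) :
    ((ys.map (fun way => way == 2 || way == 1)).all id
      && (decide ((ys.filter (fun way => !(way == 2))).length ≤ 1)
          || dead_end_py ys false))
    = (decide ((ys.countP (fun w => w == 2) : Int) + (ys.countP (fun w => w == 1) : Int)
          = (ys.length : Int))
       && (decide ((ys.length : Int) - (ys.countP (fun w => w == 2) : Int) ≤ 1)
           || decide ((ys.countP (fun w => w == 1) : Int) = (ys.length : Int)))) := by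
  have hc2 : ((ys.map (fun way => way == 2 || way == 1)).all id)
      = decide ((ys.countP (fun w => w == 2) : Int) + (ys.countP (fun w => w == 1) : Int)
          = (ys.length : Int)) := by
    rw [List.all_map, Function.id_comp, Bool.eq_iff_iff]
    simp only [List.all_eq_true, decide_eq_true_eq, Bool.or_eq_true, beq_iff_eq]
    rw [show (∀ w ∈ ys, w = 2 ∨ w = 1) ↔
        ys.countP (fun w => w == 2) + ys.countP (fun w => w == 1) = ys.length from
      (countP_two_one ys).symm]
    omega
  have hc3 : (decide ((ys.filter (fun way => !(way == 2))).length ≤ 1))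
      = decide ((ys.length : Int) - (ys.countP (fun w => w == 2) : Int) ≤ 1) := by
    have hsum : ys.length = ys.countP (fun w => w == 2)
        + ys.countP (fun w => !(w == 2)) := by
      have := List.length_eq_countP_add_countP (l := ys) (fun w => w == 2)
      simpa using this
    have hf : (ys.filter (fun way => !(way == 2))).length
        = ys.countP (fun w => !(w == 2)) :=
      (List.countP_eq_length_filter).symm
    rw [Bool.eq_iff_iff]
    simp only [decide_eq_true_eq, hf]
    omega
  have hc4 : dead_end_py ys false
      = decide ((ys.countP (fun w => w == 1) : Int) = (ys.length : Int)) := by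
    unfold dead_end_py
    rw [h3]
    simp only [Bool.false_eq_true, if_false]
    rw [List.all_map, Function.id_comp, Bool.eq_iff_iff]
    simp only [List.all_eq_true, decide_eq_true_eq]
    rw [show (∀ w ∈ ys, (w == 1) = true) ↔
        ys.countP (fun w => w == 1) = ys.length from List.countP_eq_length.symm]
    omega
  rw [hc2, hc3, hc4]

-- ===== VERDICT (by name: the statement is the Claim_ definition above) =====
theorem valid_crossroad_py_spec : Claim_equal_valid_crossroad_py := by
  intro ways _
  unfold Spec_valid_crossroad_py valid_crossroad_py valid_crossroad_py_alt
  by_cases hmem : ways.contains 3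
  · simp only [hmem, Bool.not_true, Bool.false_eq_true, if_false]
    by_cases h2 : ((PySem.List.remove? ways 3).getD ways).contains 3
    · rw [if_pos h2, if_pos h2]
    · rw [if_neg h2, if_neg h2]
      rw [fold_tally]
      simp only [zero_add]
      exact body_eq _ (Bool.eq_false_iff.mpr h2)
  · rw [Bool.eq_false_iff.mpr hmem]; rfl
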